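-- pv_equiv track=rewrite | github.com/littleshadowraven/Credit-Score-Prediction | model.py | fill_categorical_column
-- ===== SOURCE A (Python) =====
-- def fill_categorical_column(value, idx, data_arr, rows_per_customer, null_value, pb_count):
--
--     if value != null_value:
--         return value
--
--     start_idx = (idx // rows_per_customer) * rows_per_customer
--     end_idx = (idx // rows_per_customer + 1) * rows_per_customer
--     data_range = data_arr[start_idx:end_idx]
--
--     pb_count_copied = pb_count.copy()
--     for data_value in data_range:
--         pb_count_copied[data_value][1] += 1
--
--     is_all_null = True
--     pb_count_list_customer = []
--
--     for cnt_key, cnt_value in pb_count_copied.items():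
--         pb_count_list_customer.append([cnt_key, cnt_value[0], cnt_value[1]])
--         if cnt_key != null_value and cnt_value[1] > 0:
--             is_all_null = False
--
--     pb_count_list_customer.sort(key = lambda x: x[1], reverse = True)
--     pb_count_list_customer.sort(key = lambda x: x[2], reverse = True)
--
--     if is_all_null:
--         return null_value
--     else:
--         return pb_count_list_customer[0][0]
-- ===== SOURCE B (Python) =====
-- def fill_categorical_column(value, idx, data_arr, rows_per_customer, null_value, pb_count):
--     if value != null_value:
--         return value
--
--     start = (idx // rows_per_customer) * rows_per_customer
--     for s in data_arr[start:start + rows_per_customer]: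
--         pb_count[s][1] += 1
--
--     best = None
--     any_nonnull = False
--     for k, v in pb_count.items():
--         pb0, cnt = v[0], v[1]
--         if best is None or cnt > best[2] or (cnt == best[2] and pb0 > best[1]):
--             best = (k, pb0, cnt)
--         if k != null_value and cnt > 0:
--             any_nonnull = True
--     return best[0] if any_nonnull else null_value
-- ===== Notes on version B (the rewrite author's own statement) =====
-- stated objective: simpler
-- what changed: B replaces A's triple-list build plus two stable reverse sorts and head extraction by a single linear argmax scan over pb_count that keeps (best_key, best_pb0, best_cnt) and replaces the best only on a strictly greater (count, pb0) pair, so insertion order wins ties exactly as A's stable sorts do; the per-customer count increments (the in-place mutation of pb_count's inner lists, shared with the caller in both A and B) are kept.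
import Mathlib
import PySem

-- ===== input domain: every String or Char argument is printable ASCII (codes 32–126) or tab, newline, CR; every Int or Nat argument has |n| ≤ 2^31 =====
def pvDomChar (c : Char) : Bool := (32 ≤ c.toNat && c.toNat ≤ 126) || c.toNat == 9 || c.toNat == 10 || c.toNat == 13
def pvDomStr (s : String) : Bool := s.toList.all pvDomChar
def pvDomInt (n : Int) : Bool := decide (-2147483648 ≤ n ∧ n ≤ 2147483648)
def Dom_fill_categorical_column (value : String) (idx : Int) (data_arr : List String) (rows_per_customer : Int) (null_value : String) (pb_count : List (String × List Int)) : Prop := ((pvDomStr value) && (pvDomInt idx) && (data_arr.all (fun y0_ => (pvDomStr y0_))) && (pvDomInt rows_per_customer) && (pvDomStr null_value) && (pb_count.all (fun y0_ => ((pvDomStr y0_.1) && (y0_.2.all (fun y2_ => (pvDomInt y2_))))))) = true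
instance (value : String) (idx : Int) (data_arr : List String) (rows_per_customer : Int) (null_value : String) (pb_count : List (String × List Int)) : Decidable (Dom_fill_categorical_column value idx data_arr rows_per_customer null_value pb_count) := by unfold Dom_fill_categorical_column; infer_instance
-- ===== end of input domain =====

-- B replaces A's triple-list build + two stable reverse sorts + head by one strict-lex argmax scan
-- (same return value; both A and B increment pb_count's inner lists in place, observable by the caller).


-- ===== PORT A =====
-- `v[1] += 1` on an inner list; the fallthrough case is where Python raises IndexError (excluded by Pre_)
def pvInc1 (v : List Int) : List Int :=
  match v with
  | a :: b :: r => a :: (b + 1) :: r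
  | v => v

-- `pb[s][1] += 1` on the association list; `[]` is where Python raises KeyError (excluded by Pre_)
def pvUpd (L : List (String × List Int)) (s : String) : List (String × List Int) :=
  match L with
  | [] => []
  | (k, v) :: r => if k = s then (k, pvInc1 v) :: r else (k, v) :: pvUpd r s

def fill_categorical_column (value : String) (idx : Int) (data_arr : List String) (rows_per_customer : Int) (null_value : String) (pb_count : List (String × List Int)) : String :=
  if value ≠ null_value then value
  else
    let start_idx := PySem.Int.floordiv idx rows_per_customer * rows_per_customer
    let end_idx := (PySem.Int.floordiv idx rows_per_customer + 1) * rows_per_customer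
    let data_range := PySem.List.slice data_arr start_idx end_idx
    let pb_count_copied := data_range.foldl pvUpd pb_count
    -- one loop building pb_count_list_customer (as triples) and is_all_null together
    let st := pb_count_copied.foldl
      (fun (acc : List (String × Int × Int) × Bool) p =>
        (acc.1 ++ [(p.1, PySem.List.pyGetD p.2 0 0, PySem.List.pyGetD p.2 1 0)],
         if p.1 ≠ null_value ∧ 0 < PySem.List.pyGetD p.2 1 0 then false else acc.2))
      ([], true)
    let s1 := PySem.List.sorted st.1 (fun x => x.2.1) true
    let s2 := PySem.List.sorted s1 (fun x => x.2.2) true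
    if st.2 then null_value
    else
      match s2 with
      | t :: _ => t.1
      | [] => null_value   -- unreachable under Pre_: Python's [0][0] raises only if the list is empty, but then is_all_null is true

-- ===== PORT B =====
def fill_categorical_column_alt (value : String) (idx : Int) (data_arr : List String) (rows_per_customer : Int) (null_value : String) (pb_count : List (String × List Int)) : String :=
  if value ≠ null_value then value
  else
    let start := PySem.Int.floordiv idx rows_per_customer * rows_per_customer
    -- `for s in data_arr[start:start + rows_per_customer]: pb_count[s][1] += 1`
    let mutated := (PySem.List.slice data_arr start (start + rows_per_customer)).foldl pvUpd pb_count
    -- single scan: best = (key, pb0, cnt), replaced only on strictly greater (cnt, pb0); any_nonnull flag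
    let st := mutated.foldl
      (fun (acc : Option (String × Int × Int) × Bool) p =>
        ((match acc.1 with
          | none => some (p.1, PySem.List.pyGetD p.2 0 0, PySem.List.pyGetD p.2 1 0)
          | some (bk, bp, bc) =>
            if bc < PySem.List.pyGetD p.2 1 0 ∨
               (PySem.List.pyGetD p.2 1 0 = bc ∧ bp < PySem.List.pyGetD p.2 0 0) then
              some (p.1, PySem.List.pyGetD p.2 0 0, PySem.List.pyGetD p.2 1 0)
            else some (bk, bp, bc)),
         if p.1 ≠ null_value ∧ 0 < PySem.List.pyGetD p.2 1 0 then true else acc.2))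
      (none, false)
    if st.2 then
      match st.1 with
      | some t => t.1
      | none => null_value   -- unreachable: any_nonnull is false when pb_count is empty
    else null_value

-- ===== PRECONDITION & SPEC =====
-- Pre_ excludes exactly the inputs where the Python A raises: ZeroDivisionError (rows_per_customer = 0),
-- IndexError (a stored value list shorter than 2), KeyError (a sliced row value absent from pb_count);
-- Python B raises on exactly the same inputs.
def Pre_fill_categorical_column (value : String) (idx : Int) (data_arr : List String) (rows_per_customer : Int) (null_value : String) (pb_count : List (String × List Int)) : Prop :=
  value ≠ null_value ∨
    (rows_per_customer ≠ 0 ∧ (∀ p ∈ pb_count, 2 ≤ p.2.length) ∧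
     ∀ s ∈ PySem.List.slice data_arr (PySem.Int.floordiv idx rows_per_customer * rows_per_customer)
             ((PySem.Int.floordiv idx rows_per_customer + 1) * rows_per_customer),
       s ∈ pb_count.map Prod.fst)
instance (value : String) (idx : Int) (data_arr : List String) (rows_per_customer : Int) (null_value : String) (pb_count : List (String × List Int)) : Decidable (Pre_fill_categorical_column value idx data_arr rows_per_customer null_value pb_count) := by unfold Pre_fill_categorical_column; infer_instance

def pvWitness_fill_categorical_column : String × Int × List String × Int × String × (List (String × List Int)) :=
  ("N", 0, ["a"], 1, "N", [("a", [2, 0]), ("N", [5, 0])])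

def Spec_fill_categorical_column (value : String) (idx : Int) (data_arr : List String) (rows_per_customer : Int) (null_value : String) (pb_count : List (String × List Int)) (out : String) : Prop := out = fill_categorical_column_alt value idx data_arr rows_per_customer null_value pb_count
instance (value : String) (idx : Int) (data_arr : List String) (rows_per_customer : Int) (null_value : String) (pb_count : List (String × List Int)) (out : String) : Decidable (Spec_fill_categorical_column value idx data_arr rows_per_customer null_value pb_count out) := by unfold Spec_fill_categorical_column; infer_instance

-- ===== CLAIM (what is proved, stated in full; the proofs are below) =====
def Claim_equal_fill_categorical_column : Prop := ∀ (value : String) (idx : Int) (data_arr : List String) (rows_per_customer : Int) (null_value : String) (pb_count : List (String × List Int)), Dom_fill_categorical_column value idx data_arr rows_per_customer null_value pb_count → Pre_fill_categorical_column value idx data_arr rows_per_customer null_value pb_count → Spec_fill_categorical_column value idx data_arr rows_per_customer null_value pb_count (fill_categorical_column value idx data_arr rows_per_customer null_value pb_count)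

-- ===== LEMMAS AND PROOFS =====

-- the running first-maximum of the OUTER reverse sort's key (x[2] = cnt), earliest wins
def pvStep2 (b : Option (String × Int × Int)) (y : String × Int × Int) : Option (String × Int × Int) :=
  match b with
  | none => some y
  | some m => if m.2.2 < y.2.2 then some y else some m

-- B's scan step: replace only on strictly greater (cnt, pb0)
def pvStepL (b : Option (String × Int × Int)) (y : String × Int × Int) : Option (String × Int × Int) :=
  match b with
  | none => some y
  | some m => if m.2.2 < y.2.2 ∨ (y.2.2 = m.2.2 ∧ m.2.1 < y.2.1) then some y else some m

theorem pv_headIns (bef : (String × Int × Int) → (String × Int × Int) → Bool) (x : String × Int × Int) (acc : List (String × Int × Int)) :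
    (PySem.List.insertBy bef x acc).head? =
      some (match acc with | [] => x | y :: _ => if bef x y then x else y) := by
  cases acc with
  | nil => rfl
  | cons y ys => simp only [PySem.List.insertBy]; by_cases h : bef x y <;> simp [h]

-- head? of the reverse insertion sort = running first-max scan
theorem pv_H1 (l : List (String × Int × Int)) : ∀ (acc : List (String × Int × Int)),
    (l.foldl (fun a x => PySem.List.insertBy (fun a b => decide (b.2.2 < a.2.2)) x a) acc).head? =
      l.foldl pvStep2 acc.head? := by
  induction l with
  | nil => intro acc; rfl
  | cons x l ih =>
    intro acc
    simp only [List.foldl_cons]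
    rw [ih, pv_headIns]
    congr 1
    cases acc with
    | nil => rfl
    | cons y ys =>
      simp only [pvStep2, List.head?_cons]
      by_cases h : y.2.2 < x.2.2 <;> simp [h]

theorem pv_mono (l : List (String × Int × Int)) : ∀ (m : String × Int × Int),
    ∃ m', l.foldl pvStep2 (some m) = some m' ∧ (m' = m ∨ m.2.2 < m'.2.2) := by
  induction l with
  | nil => intro m; exact ⟨m, rfl, Or.inl rfl⟩
  | cons y l ih =>
    intro m
    simp only [List.foldl_cons, pvStep2]
    by_cases h : m.2.2 < y.2.2
    · rw [if_pos h]
      obtain ⟨m', h1, h2⟩ := ih y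
      refine ⟨m', h1, Or.inr ?_⟩
      rcases h2 with rfl | h2 <;> omega
    · rw [if_neg h]; exact ih m

theorem pv_nodisp (l : List (String × Int × Int)) (m x : String × Int × Int)
    (h : x.2.2 < m.2.2 ∨ (x.2.2 = m.2.2 ∧ x.2.1 ≤ m.2.1)) :
    pvStepL (l.foldl pvStep2 (some m)) x = l.foldl pvStep2 (some m) := by
  obtain ⟨m', hm', hrel⟩ := pv_mono l m
  rw [hm']
  simp only [pvStepL]
  rw [if_neg]
  rcases hrel with rfl | hlt <;> rcases h with h | ⟨h1, h2⟩ <;>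
    rintro (g | ⟨g1, g2⟩) <;> omega

theorem pv_lemZ (l : List (String × Int × Int)) : ∀ (z x : String × Int × Int),
    (∀ w ∈ l, w.2.1 < x.2.1) →
    (z.2.2 < x.2.2 ∨ (z.2.2 = x.2.2 ∧ z.2.1 < x.2.1)) →
    pvStepL (l.foldl pvStep2 (some z)) x = l.foldl pvStep2 (some x) := by
  induction l with
  | nil =>
    intro z x _ hz
    simp only [List.foldl_nil, pvStepL]
    rw [if_pos]
    rcases hz with h | ⟨h1, h2⟩
    · exact Or.inl h
    · exact Or.inr ⟨h1.symm, h2⟩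
  | cons w l ih =>
    intro z x hl hz
    have hw := hl w (List.mem_cons_self ..)
    have hl' : ∀ u ∈ l, u.2.1 < x.2.1 := fun u hu => hl u (List.mem_cons_of_mem _ hu)
    simp only [List.foldl_cons, pvStep2]
    by_cases hzw : z.2.2 < w.2.2
    · rw [if_pos hzw]
      by_cases hxw : x.2.2 < w.2.2
      · rw [if_pos hxw]
        exact pv_nodisp l w x (Or.inl hxw)
      · rw [if_neg hxw]
        refine ih w x hl' ?_
        rcases lt_or_eq_of_le (not_lt.mp hxw) with h | h
        · exact Or.inl h
        · exact Or.inr ⟨h, hw⟩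
    · rw [if_neg hzw]
      have : ¬ x.2.2 < w.2.2 := by
        rcases hz with h | ⟨h1, _⟩ <;> omega
      rw [if_neg this]
      exact ih z x hl' hz

theorem pv_step1 (b : Option (String × Int × Int)) (x : String × Int × Int)
    (hb : ∀ m, b = some m → x.2.1 ≤ m.2.1) : pvStep2 b x = pvStepL b x := by
  cases b with
  | none => rfl
  | some m =>
    have := hb m rfl
    simp only [pvStep2, pvStepL]
    by_cases h : m.2.2 < x.2.2
    · rw [if_pos h, if_pos (Or.inl h)]
    · rw [if_neg h, if_neg]
      rintro (g | ⟨g1, g2⟩) <;> omega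

theorem pv_swap (l : List (String × Int × Int)) : ∀ (b : Option (String × Int × Int)) (x : String × Int × Int),
    (∀ z ∈ l, z.2.1 < x.2.1) → (∀ m, b = some m → x.2.1 ≤ m.2.1) →
    l.foldl pvStep2 (pvStep2 b x) = pvStepL (l.foldl pvStep2 b) x := by
  induction l with
  | nil =>
    intro b x _ hb
    simp only [List.foldl_nil]
    exact pv_step1 b x hb
  | cons z l ih =>
    intro b x hl hb
    have hlz := hl z (List.mem_cons_self ..)
    have hl' : ∀ u ∈ l, u.2.1 < x.2.1 := fun u hu => hl u (List.mem_cons_of_mem _ hu)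
    cases b with
    | none =>
      simp only [List.foldl_cons, pvStep2]
      by_cases h1 : x.2.2 < z.2.2
      · rw [if_pos h1]
        exact (pv_nodisp l z x (Or.inl h1)).symm
      · rw [if_neg h1]
        refine (pv_lemZ l z x hl' ?_).symm
        rcases lt_or_eq_of_le (not_lt.mp h1) with h | h
        · exact Or.inl h
        · exact Or.inr ⟨h, hlz⟩
    | some m =>
      have hbm := hb m rfl
      by_cases hmx : m.2.2 < x.2.2
      · simp only [List.foldl_cons, pvStep2, if_pos hmx]
        by_cases hmz : m.2.2 < z.2.2
        · rw [if_pos hmz]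
          by_cases h1 : x.2.2 < z.2.2
          · rw [if_pos h1]
            exact (pv_nodisp l z x (Or.inl h1)).symm
          · rw [if_neg h1]
            refine (pv_lemZ l z x hl' ?_).symm
            rcases lt_or_eq_of_le (not_lt.mp h1) with h | h
            · exact Or.inl h
            · exact Or.inr ⟨h, hlz⟩
        · rw [if_neg hmz]
          have : ¬ x.2.2 < z.2.2 := by omega
          rw [if_neg this]
          exact (pv_lemZ l m x hl' (Or.inl hmx)).symm
      · simp only [List.foldl_cons, pvStep2, if_neg hmx]
        by_cases hmz : m.2.2 < z.2.2
        · rw [if_pos hmz]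
          exact (pv_nodisp l z x (Or.inl (by omega))).symm
        · rw [if_neg hmz]
          refine (pv_nodisp l m x ?_).symm
          rcases lt_or_eq_of_le (not_lt.mp hmx) with h | h
          · exact Or.inl h
          · exact Or.inr ⟨h, hbm⟩

theorem pv_pairIns (x : String × Int × Int) (acc : List (String × Int × Int))
    (h : acc.Pairwise (fun a c => c.2.1 ≤ a.2.1)) :
    (PySem.List.insertBy (fun a c => decide (c.2.1 < a.2.1)) x acc).Pairwise (fun a c => c.2.1 ≤ a.2.1) := by
  induction acc with
  | nil => simp [PySem.List.insertBy]
  | cons y ys ih =>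
    rcases List.pairwise_cons.mp h with ⟨hy, hys⟩
    simp only [PySem.List.insertBy]
    by_cases hxy : y.2.1 < x.2.1
    · simp only [decide_eq_true_eq, hxy, if_pos]
      refine List.pairwise_cons.mpr ⟨?_, h⟩
      intro z hz
      rcases List.mem_cons.mp hz with rfl | hz
      · omega
      · have := hy z hz; omega
    · simp only [decide_eq_true_eq, hxy, if_neg, not_false_iff]
      refine List.pairwise_cons.mpr ⟨?_, ih hys⟩
      intro z hz
      rcases (PySem.List.mem_insertBy _ _ _ _).mp hz with rfl | hz
      · omega
      · exact hy z hz

theorem pv_ins (acc : List (String × Int × Int)) : ∀ (b : Option (String × Int × Int)) (x : String × Int × Int),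
    acc.Pairwise (fun a c => c.2.1 ≤ a.2.1) → (∀ m, b = some m → x.2.1 ≤ m.2.1) →
    (PySem.List.insertBy (fun a c => decide (c.2.1 < a.2.1)) x acc).foldl pvStep2 b =
      pvStepL (acc.foldl pvStep2 b) x := by
  induction acc with
  | nil =>
    intro b x _ hb
    simp only [PySem.List.insertBy, List.foldl_cons, List.foldl_nil]
    exact pv_step1 b x hb
  | cons y ys ih =>
    intro b x h hb
    rcases List.pairwise_cons.mp h with ⟨hy, hys⟩
    simp only [PySem.List.insertBy]
    by_cases hxy : y.2.1 < x.2.1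
    · simp only [decide_eq_true_eq, hxy, if_pos]
      have hl : ∀ z ∈ y :: ys, z.2.1 < x.2.1 := by
        intro z hz
        rcases List.mem_cons.mp hz with rfl | hz
        · exact hxy
        · have := hy z hz; omega
      simpa using pv_swap (y :: ys) b x hl hb
    · simp only [decide_eq_true_eq, hxy, if_neg, not_false_iff]
      simp only [List.foldl_cons]
      rw [ih (pvStep2 b y) x hys]
      intro m hm
      cases b with
      | none =>
        simp only [pvStep2] at hm
        cases hm; omega
      | some m0 =>
        simp only [pvStep2] at hm
        by_cases h0 : m0.2.2 < y.2.2
        · rw [if_pos h0] at hm; cases hm; omega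
        · rw [if_neg h0] at hm; exact hb m hm

theorem pv_G (l : List (String × Int × Int)) : ∀ (acc : List (String × Int × Int)),
    acc.Pairwise (fun a c => c.2.1 ≤ a.2.1) →
    (l.foldl (fun a x => PySem.List.insertBy (fun a c => decide (c.2.1 < a.2.1)) x a) acc).foldl pvStep2 none =
      l.foldl pvStepL (acc.foldl pvStep2 none) := by
  induction l with
  | nil => intro acc _; rfl
  | cons x l ih =>
    intro acc h
    simp only [List.foldl_cons]
    rw [ih _ (pv_pairIns x acc h), pv_ins acc none x h (by intro m hm; cases hm)]

-- A's single loop = triple list build + is_all_null flag fold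
theorem pv_Asplit (null : String) (L : List (String × List Int)) :
    ∀ (l0 : List (String × Int × Int)) (b0 : Bool),
    L.foldl (fun (acc : List (String × Int × Int) × Bool) p =>
        (acc.1 ++ [(p.1, PySem.List.pyGetD p.2 0 0, PySem.List.pyGetD p.2 1 0)],
         if p.1 ≠ null ∧ 0 < PySem.List.pyGetD p.2 1 0 then false else acc.2)) (l0, b0)
    = (l0 ++ L.map (fun p => (p.1, PySem.List.pyGetD p.2 0 0, PySem.List.pyGetD p.2 1 0)),
       L.foldl (fun b p => if p.1 ≠ null ∧ 0 < PySem.List.pyGetD p.2 1 0 then false else b) b0) := by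
  induction L with
  | nil => intro l0 b0; simp
  | cons p L ih => intro l0 b0; simp only [List.foldl_cons, List.map_cons]; rw [ih]; simp

-- B's single loop = best scan (pvStepL on triples) + any_nonnull flag fold
theorem pv_Bsplit (null : String) (L : List (String × List Int)) :
    ∀ (o0 : Option (String × Int × Int)) (b0 : Bool),
    L.foldl (fun (acc : Option (String × Int × Int) × Bool) p =>
        ((match acc.1 with
          | none => some (p.1, PySem.List.pyGetD p.2 0 0, PySem.List.pyGetD p.2 1 0)
          | some (bk, bp, bc) =>
            if bc < PySem.List.pyGetD p.2 1 0 ∨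
               (PySem.List.pyGetD p.2 1 0 = bc ∧ bp < PySem.List.pyGetD p.2 0 0) then
              some (p.1, PySem.List.pyGetD p.2 0 0, PySem.List.pyGetD p.2 1 0)
            else some (bk, bp, bc)),
         if p.1 ≠ null ∧ 0 < PySem.List.pyGetD p.2 1 0 then true else acc.2)) (o0, b0)
    = (L.foldl (fun o p => pvStepL o (p.1, PySem.List.pyGetD p.2 0 0, PySem.List.pyGetD p.2 1 0)) o0,
       L.foldl (fun b p => if p.1 ≠ null ∧ 0 < PySem.List.pyGetD p.2 1 0 then true else b) b0) := by
  induction L with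
  | nil => intro o0 b0; rfl
  | cons p L ih =>
    intro o0 b0
    simp only [List.foldl_cons]
    rw [ih]
    congr 2
    cases o0 with
    | none => rfl
    | some m => rcases m with ⟨bk, bp, bc⟩; rfl

-- A's is_all_null is the negation of B's any_nonnull
theorem pv_flag (null : String) (L : List (String × List Int)) : ∀ (b : Bool),
    L.foldl (fun b p => if p.1 ≠ null ∧ 0 < PySem.List.pyGetD p.2 1 0 then false else b) b
    = !(L.foldl (fun b p => if p.1 ≠ null ∧ 0 < PySem.List.pyGetD p.2 1 0 then true else b) (!b)) := by
  induction L with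
  | nil => intro b; simp
  | cons p L ih =>
    intro b
    simp only [List.foldl_cons]
    by_cases h : p.1 ≠ null ∧ 0 < PySem.List.pyGetD p.2 1 0
    · rw [if_pos h, if_pos h]
      simpa using ih false
    · rw [if_neg h, if_neg h]
      exact ih b

theorem pv_match_head (xs : List (String × Int × Int)) (d : String) :
    (match xs with | t :: _ => t.1 | [] => d) =
      (match xs.head? with | some t => t.1 | none => d) := by
  cases xs <;> rfl

-- ===== VERDICT (by name: the statement is the Claim_ definition above) =====
theorem fill_categorical_column_spec : Claim_equal_fill_categorical_column := by
  intro value idx data_arr rows_per_customer null_value pb_count _ _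
  unfold Spec_fill_categorical_column fill_categorical_column fill_categorical_column_alt
  by_cases hv : value ≠ null_value
  · rw [if_pos hv, if_pos hv]
  · rw [if_neg hv, if_neg hv]
    have hnd : (PySem.Int.floordiv idx rows_per_customer + 1) * rows_per_customer =
        PySem.Int.floordiv idx rows_per_customer * rows_per_customer + rows_per_customer := by ring
    rw [hnd]
    simp only [pv_Asplit, pv_Bsplit, List.nil_append]
    rw [pv_flag null_value _ true, Bool.not_true]
    set L := (PySem.List.slice data_arr
        (PySem.Int.floordiv idx rows_per_customer * rows_per_customer)
        (PySem.Int.floordiv idx rows_per_customer * rows_per_customer + rows_per_customer)).foldl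
        pvUpd pb_count with hLdef
    set T := L.map (fun p => (p.1, PySem.List.pyGetD p.2 0 0, PySem.List.pyGetD p.2 1 0)) with hT
    have hbest : (PySem.List.sorted (PySem.List.sorted T (fun x => x.2.1) true)
          (fun x => x.2.2) true).head? =
        L.foldl (fun o p => pvStepL o (p.1, PySem.List.pyGetD p.2 0 0, PySem.List.pyGetD p.2 1 0)) none := by
      rw [PySem.List.sorted_rev_eq_foldl_insertBy, pv_H1,
          PySem.List.sorted_rev_eq_foldl_insertBy]
      have := pv_G T [] List.Pairwise.nil
      simp only [List.foldl_nil, List.head?_nil] at this ⊢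
      rw [this, hT, List.foldl_map]
    rw [← hbest]
    cases hbf : L.foldl
        (fun b p => if p.1 ≠ null_value ∧ 0 < PySem.List.pyGetD p.2 1 0 then true else b) false with
    | true =>
      simp only [Bool.not_true, if_neg, Bool.false_eq_true, not_false_iff, if_pos]
      rw [pv_match_head]
    | false =>
      simp only [Bool.not_false, if_pos, if_neg, Bool.false_eq_true, not_false_iff]
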